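-- pv_equiv track=rewrite | github.com/hji1014/HJI_Algorithm | Programmers/Lv_1/Lv_1_solution.py | solution
-- ===== SOURCE A (Python) =====
-- def solution(n, arr1, arr2):
--     answer = []
--     answer_encoding = []
--     arr1_decoding = []
--     arr2_decoding = []
--
--     for i in range(n):
--         remainders = []
--         num = arr1[i]
--         while num != 0:
--             remainder = num % 2
--             remainders.append(remainder)
--             num = num // 2
--         while len(remainders) != n:
--             remainders.append(0)
--         remainders.reverse()
--         arr1_decoding.append(remainders)
--
--     for i in range(n):
--         remainders = []
--         num = arr2[i]
--         while num != 0: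
--             remainder = num % 2
--             remainders.append(remainder)
--             num = num // 2
--         while len(remainders) != n:
--             remainders.append(0)
--         remainders.reverse()
--         arr2_decoding.append(remainders)
--
--     for i in range(n):
--         answer_row = []
--         for j in range(n):
--             arr1_row = arr1_decoding[i]
--             arr2_row = arr2_decoding[i]
--             if arr1_row[j] == 0 and arr2_row[j] == 0:
--                 answer_row.append(0)
--             else:
--                 answer_row.append(1)
--         answer_encoding.append(answer_row)
--
--     for i in range(n):
--         ans = ''
--         for j in range(n):
--             if answer_encoding[i][j] == 1:
--                 ans += '#'
--             else:
--                 ans += ' '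
--         answer.append(ans)
--
--     return answer
-- ===== SOURCE B (Python) =====
-- def solution(n, arr1, arr2):
--     table = str.maketrans('10', '# ')
--     return [format(arr1[i] | arr2[i], f'0{n}b').translate(table) for i in range(n)]
-- ===== Notes on version B (the rewrite author's own statement) =====
-- stated objective: simpler
-- what changed: Replaces A's four passes (per-bit decode of each array into digit lists, pointwise OR pass, string-encode pass) with a single pass over rows that ORs the two row integers and formats the result as a zero-padded binary string translated '1'->'#', '0'->' '.
import Mathlib
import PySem

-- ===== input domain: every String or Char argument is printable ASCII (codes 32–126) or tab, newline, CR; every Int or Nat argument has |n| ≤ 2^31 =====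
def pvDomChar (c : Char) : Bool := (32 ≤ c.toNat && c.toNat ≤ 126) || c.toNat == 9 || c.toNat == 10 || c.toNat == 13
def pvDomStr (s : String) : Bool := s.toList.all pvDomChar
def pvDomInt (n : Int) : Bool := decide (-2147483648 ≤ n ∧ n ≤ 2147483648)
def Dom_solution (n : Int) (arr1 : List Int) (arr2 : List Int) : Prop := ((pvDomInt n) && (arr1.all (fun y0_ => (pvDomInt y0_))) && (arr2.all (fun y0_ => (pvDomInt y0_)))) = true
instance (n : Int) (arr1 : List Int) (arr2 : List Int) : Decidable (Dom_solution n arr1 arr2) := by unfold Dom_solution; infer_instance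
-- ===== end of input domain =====

-- B renders each row in ONE pass — integer OR of the two row numbers, zero-padded binary
-- formatting, then a '1'→'#' / '0'→' ' translation — instead of A's four passes over
-- hand-decoded per-bit digit arrays.  Objective: simpler.

-- ===== PORT A =====
-- `while num != 0: remainders.append(num % 2); num = num // 2` (fuel: inside Pre_ the loop
-- runs at most bit-length-many ≤ num.natAbs iterations, so num.natAbs + 1 fuel is exact there)
def pvWhileBits : Nat → Int → List Int → List Int
  | 0, _, rem => rem
  | fuel+1, num, rem =>
    if num ≠ 0 then pvWhileBits fuel (PySem.Int.floordiv num 2) (rem ++ [PySem.Int.mod num 2])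
    else rem

-- `while len(remainders) != n: remainders.append(0)` (fuel n.toNat is exact when len ≤ n)
def pvWhilePad : Nat → Int → List Int → List Int
  | 0, _, rem => rem
  | fuel+1, n, rem => if (rem.length : Int) ≠ n then pvWhilePad fuel n (rem ++ [(0:Int)]) else rem

-- the decode block A repeats verbatim for arr1 and for arr2
def pvDecode (n : Int) (arr : List Int) (i : Int) : List Int :=
  (pvWhilePad n.toNat n
    (pvWhileBits ((PySem.List.pyGetD arr i 0).natAbs + 1) (PySem.List.pyGetD arr i 0) [])).reverse

def solution (n : Int) (arr1 : List Int) (arr2 : List Int) : List String :=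
  let arr1dec := (PySem.List.pyRange 0 n 1).foldl (fun acc i => acc ++ [pvDecode n arr1 i]) []
  let arr2dec := (PySem.List.pyRange 0 n 1).foldl (fun acc i => acc ++ [pvDecode n arr2 i]) []
  let answerEnc := (PySem.List.pyRange 0 n 1).foldl (fun acc i =>
    let row := (PySem.List.pyRange 0 n 1).foldl (fun r j =>
      let r1 := PySem.List.pyGetD arr1dec i []
      let r2 := PySem.List.pyGetD arr2dec i []
      if PySem.List.pyGetD r1 j 0 = 0 ∧ PySem.List.pyGetD r2 j 0 = 0
      then r ++ [(0:Int)] else r ++ [(1:Int)]) []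
    acc ++ [row]) []
  (PySem.List.pyRange 0 n 1).foldl (fun acc i =>
    let ans := (PySem.List.pyRange 0 n 1).foldl (fun s j =>
      if PySem.List.pyGetD (PySem.List.pyGetD answerEnc i []) j 0 = 1
      then s ++ ['#'] else s ++ [' ']) ([] : List Char)
    acc ++ [String.ofList ans]) []

-- ===== PORT B =====
-- binary digits of m, most significant first (empty for 0), as format(m, 'b') produces them
def pvBinChars (m : Nat) : List Char :=
  if h : m = 0 then [] else pvBinChars (m / 2) ++ [if m % 2 = 1 then '1' else '0']
decreasing_by exact Nat.div_lt_self (Nat.pos_of_ne_zero h) one_lt_two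

-- format(x, f'0{n}b'): binary digits ('0' for zero), zero-padded left to width n,
-- a leading '-' (counted in the width) for negative x
def pvFormatBin (x : Int) (n : Int) : List Char :=
  let ds := if x.natAbs = 0 then ['0'] else pvBinChars x.natAbs
  if x < 0 then '-' :: (List.replicate (n.toNat - 1 - ds.length) '0' ++ ds)
  else List.replicate (n.toNat - ds.length) '0' ++ ds

-- str.maketrans('10', '# ') applied per character
def pvTranslate (c : Char) : Char := if c = '1' then '#' else if c = '0' then ' ' else c

def solution_alt (n : Int) (arr1 : List Int) (arr2 : List Int) : List String :=
  (PySem.List.pyRange 0 n 1).map (fun i =>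
    String.ofList ((pvFormatBin (Int.lor (PySem.List.pyGetD arr1 i 0) (PySem.List.pyGetD arr2 i 0)) n).map pvTranslate))

-- ===== PRECONDITION & SPEC =====
-- Pre_ is exactly where the Python A returns: A raises IndexError when an array is shorter
-- than n, and its decode/pad while-loops never terminate for a negative entry or an entry ≥ 2^n
-- among the first n; for n ≤ 0 every input qualifies (A returns []).
def Pre_solution (n : Int) (arr1 : List Int) (arr2 : List Int) : Prop :=
  n ≤ (arr1.length : Int) ∧ n ≤ (arr2.length : Int) ∧
  (∀ x ∈ arr1.take n.toNat, 0 ≤ x ∧ x < 2 ^ n.toNat) ∧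
  (∀ x ∈ arr2.take n.toNat, 0 ≤ x ∧ x < 2 ^ n.toNat)
instance (n : Int) (arr1 : List Int) (arr2 : List Int) : Decidable (Pre_solution n arr1 arr2) := by
  unfold Pre_solution; infer_instance

def pvWitness_solution : Int × List Int × List Int := (2, [1, 2], [2, 1])

def Spec_solution (n : Int) (arr1 : List Int) (arr2 : List Int) (out : List String) : Prop := out = solution_alt n arr1 arr2
instance (n : Int) (arr1 : List Int) (arr2 : List Int) (out : List String) : Decidable (Spec_solution n arr1 arr2 out) := by unfold Spec_solution; infer_instance

-- ===== CLAIM (what is proved, stated in full; the proofs are below) =====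
def Claim_equal_solution : Prop := ∀ (n : Int) (arr1 : List Int) (arr2 : List Int), Dom_solution n arr1 arr2 → Pre_solution n arr1 arr2 → Spec_solution n arr1 arr2 (solution n arr1 arr2)

-- ===== LEMMAS AND PROOFS =====

def bitsL (m : Nat) : List Int :=
  if h : m = 0 then [] else ((m % 2 : Nat) : Int) :: bitsL (m / 2)
decreasing_by exact Nat.div_lt_self (Nat.pos_of_ne_zero h) one_lt_two

lemma pvWhileBits_eq : ∀ (fuel m : Nat), m < fuel → ∀ acc,
    pvWhileBits fuel (m : Int) acc = acc ++ bitsL m := by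
  intro fuel
  induction fuel with
  | zero => omega
  | succ f ih =>
    intro m hm acc
    by_cases h0 : m = 0
    · subst h0; simp [pvWhileBits, bitsL]
    · rw [pvWhileBits]
      have hne : (m : Int) ≠ 0 := by exact_mod_cast h0
      rw [if_pos hne]
      have hfd : PySem.Int.floordiv (m : Int) 2 = ((m / 2 : Nat) : Int) :=
        PySem.Int.floordiv_natCast m 2
      have hmd : PySem.Int.mod (m : Int) 2 = ((m % 2 : Nat) : Int) :=
        PySem.Int.mod_natCast m 2
      rw [hfd, hmd, ih (m / 2) (by omega)]
      conv_rhs => rw [bitsL]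
      rw [dif_neg h0]
      simp
lemma pvWhilePad_eq : ∀ (fuel N : Nat) (rem : List Int), N - rem.length ≤ fuel → rem.length ≤ N →
    pvWhilePad fuel (N : Int) rem = rem ++ List.replicate (N - rem.length) 0 := by
  intro fuel
  induction fuel with
  | zero =>
    intro N rem h1 h2
    have : N - rem.length = 0 := by omega
    simp [pvWhilePad, this]
  | succ f ih =>
    intro N rem h1 h2
    rw [pvWhilePad]
    by_cases he : rem.length = N
    · rw [if_neg (by exact_mod_cast not_not.mpr (by exact_mod_cast he))]
      simp [he]
    · have hne : ((rem.length : Int)) ≠ (N : Int) := by exact_mod_cast he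
      rw [if_pos hne, ih N (rem ++ [0]) (by simp; omega) (by simp; omega), List.append_assoc]
      have : N - rem.length = (N - (rem ++ [0]).length) + 1 := by simp; omega
      rw [this]
      simp [List.replicate_succ]

lemma bitsL_length_le : ∀ (N m : Nat), m < 2 ^ N → (bitsL m).length ≤ N := by
  intro N
  induction N with
  | zero => intro m hm; interval_cases m; simp [bitsL]
  | succ n ih =>
    intro m hm
    by_cases h0 : m = 0
    · subst h0; simp [bitsL]
    · rw [bitsL, dif_neg h0]
      have := ih (m / 2) (by omega)
      simpa using this

lemma bitsL_pad : ∀ (N m : Nat), m < 2 ^ N →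
    bitsL m ++ List.replicate (N - (bitsL m).length) 0
      = (List.range N).map (fun j => if m.testBit j then (1 : Int) else 0) := by
  intro N
  induction N with
  | zero => intro m hm; interval_cases m; simp [bitsL]
  | succ n ih =>
    intro m hm
    by_cases h0 : m = 0
    · subst h0
      simp [bitsL, Nat.zero_testBit, List.map_const', List.length_range]
    · rw [bitsL, dif_neg h0]
      have hlen := bitsL_length_le n (m / 2) (by omega)
      have hrec := ih (m / 2) (by omega)
      rw [List.range_succ_eq_map, List.map_cons, List.map_map]
      have hsub : n + 1 - (((m % 2 : Nat) : Int) :: bitsL (m / 2)).length = n - (bitsL (m / 2)).length := by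
        simp
      rw [hsub]
      simp only [List.cons_append]
      congr 1
      · rcases Nat.mod_two_eq_zero_or_one m with h | h <;>
          simp [Nat.testBit_zero, h]
      rw [hrec]
      apply List.map_congr_left
      intro j _
      simp [Nat.testBit_succ]
lemma pvDecode_eq (N : Nat) (arr : List Int) (k : Nat) (hk : k < N) (hlen : N ≤ arr.length)
    (hx : 0 ≤ arr[k]'(by omega) ∧ arr[k]'(by omega) < 2 ^ N) :
    pvDecode (N : Int) arr (k : Int)
      = ((List.range N).map (fun j => if (arr[k]'(by omega)).toNat.testBit j then (1 : Int) else 0)).reverse := by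
  have hget : PySem.List.pyGetD arr (k : Int) 0 = arr[k]'(by omega) := by
    rw [PySem.List.pyGetD_natCast, List.getD_eq_getElem arr 0 (by omega)]
  set x := arr[k]'(by omega) with hxdef
  have hcast : (x.toNat : Int) = x := Int.toNat_of_nonneg hx.1
  have hbound : x.toNat < 2 ^ N := by
    have h2 := hx.2
    have hp : ((2:Int))^N = ((2^N : Nat) : Int) := by push_cast; ring
    omega
  have habs : x.natAbs = x.toNat := by omega
  unfold pvDecode
  rw [hget, ← hcast]
  simp only [Int.natAbs_natCast, Int.toNat_natCast]
  rw [pvWhileBits_eq (x.toNat + 1) x.toNat (by omega) []]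
  rw [List.nil_append]
  rw [pvWhilePad_eq N N (bitsL x.toNat) (by omega) (bitsL_length_le N x.toNat hbound)]
  rw [bitsL_pad N x.toNat hbound]
  simp
def canonRow (N m : Nat) : List Char :=
  (List.range N).map (fun k => if m.testBit (N - 1 - k) then '#' else ' ')

lemma pvBinChars_eq : ∀ (m : Nat),
    pvBinChars m = ((bitsL m).reverse).map (fun b => if b = 1 then '1' else '0') := by
  intro m
  induction m using Nat.strong_induction_on with
  | _ m ih =>
    by_cases h0 : m = 0
    · subst h0; simp [pvBinChars, bitsL]
    · rw [pvBinChars, dif_neg h0, bitsL, dif_neg h0]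
      rw [ih (m / 2) (Nat.div_lt_self (Nat.pos_of_ne_zero h0) one_lt_two)]
      simp only [List.reverse_cons, List.map_append, List.map_cons, List.map_nil]
      congr 1
      rcases Nat.mod_two_eq_zero_or_one m with h | h <;> simp [h]

lemma canonRow_rev (N m : Nat) :
    canonRow N m = (((List.range N).map (fun j => if m.testBit j then '#' else ' ')).reverse) := by
  apply List.ext_getElem
  · simp [canonRow]
  · intro k h1 h2
    simp only [canonRow, List.getElem_map, List.getElem_range,
      List.getElem_reverse]
    simp at h1 h2 ⊢

lemma formatBin_eq (N m : Nat) (hN : 0 < N) (hm : m < 2 ^ N) :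
    (pvFormatBin (m : Int) (N : Int)).map pvTranslate = canonRow N m := by
  rw [canonRow_rev]
  unfold pvFormatBin
  rw [if_neg (by exact_mod_cast Int.not_lt.mpr (Int.natCast_nonneg m) : ¬ ((m:Int) < 0))]
  simp only [Int.natAbs_natCast, Int.toNat_natCast]
  by_cases h0 : m = 0
  · subst h0
    simp [pvTranslate, Nat.zero_testBit, List.map_const', List.length_range]
    conv_rhs => rw [show N = (N-1)+1 by omega, List.replicate_succ']
  · rw [if_neg h0, pvBinChars_eq m]
    have hkey := bitsL_pad N m hm
    have hrhs : (List.range N).map (fun j => if m.testBit j then '#' else ' ')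
        = List.map (fun b : Int => if b = 1 then '#' else ' ')
            (bitsL m ++ List.replicate (N - (bitsL m).length) 0) := by
      rw [hkey, List.map_map]
      apply List.map_congr_left
      intro j _
      by_cases h : m.testBit j <;> simp [h]
    rw [hrhs]
    simp only [List.map_append, List.map_reverse, List.map_map, List.reverse_append,
      List.map_replicate, List.length_map, List.length_reverse,
      List.reverse_replicate]
    congr 1
    apply congrArg
    apply List.map_congr_left
    intro a _
    by_cases h : a = (1:Int) <;> simp [h, pvTranslate]
-- fold with an if on both branches appending one element is a map
lemma foldl_if_append {α β : Type} (p : α → Prop) [DecidablePred p] (a b : β) (l : List α) :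
    l.foldl (fun r j => if p j then r ++ [a] else r ++ [b]) []
      = l.map (fun j => if p j then a else b) := by
  have hfun : (fun (r : List β) j => if p j then r ++ [a] else r ++ [b])
      = (fun r j => r ++ [if p j then a else b]) := by
    funext r j; by_cases h : p j <;> simp [h]
  rw [hfun, PySem.List.foldl_append_singleton_eq_map]
  simp


-- ===== VERDICT (by name: the statement is the Claim_ definition above) =====
theorem solution_spec : Claim_equal_solution := by
  intro n arr1 arr2 _hdom hpre
  unfold Spec_solution
  obtain ⟨hl1, hl2, hb1, hb2⟩ := hpre
  -- rewrite A's folds as maps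
  unfold solution solution_alt
  simp only [PySem.List.foldl_append_singleton_eq_map, List.nil_append]
  apply List.ext_getElem
  · simp [PySem.List.length_pyRange_one]
  · intro k h1 h2
    have hkn : (k : Int) < n := by
      simp only [List.length_map, PySem.List.length_pyRange_one, Int.sub_zero] at h1
      omega
    have hn0 : (0:Int) < n := by
      have : (0:Int) ≤ (k : Int) := Int.natCast_nonneg k
      omega
    obtain ⟨N, rfl⟩ : ∃ N : Nat, n = (N : Int) :=
      ⟨n.toNat, (Int.toNat_of_nonneg (le_of_lt hn0)).symm⟩
    have hNt : ((N : Int)).toNat = N := rfl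
    rw [hNt] at hb1 hb2
    have hL1 : N ≤ arr1.length := by exact_mod_cast hl1
    have hL2 : N ≤ arr2.length := by exact_mod_cast hl2
    have hkN : k < N := by exact_mod_cast hkn
    have hN0 : 0 < N := by omega
    simp only [List.getElem_map, PySem.List.getElem_pyRange_one]
    simp only [zero_add]
    rw [PySem.List.pyGetD_natCast arr1 k 0, PySem.List.pyGetD_natCast arr2 k 0,
        List.getD_eq_getElem arr1 0 (by omega), List.getD_eq_getElem arr2 0 (by omega)]
    have hmem1 : arr1[k]'(by omega) ∈ arr1.take N := by
      have h : k < (arr1.take N).length := by simp [List.length_take]; omega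
      have := List.getElem_mem h
      simpa [List.getElem_take] using this
    have hmem2 : arr2[k]'(by omega) ∈ arr2.take N := by
      have h : k < (arr2.take N).length := by simp [List.length_take]; omega
      have := List.getElem_mem h
      simpa [List.getElem_take] using this
    have hx1 := hb1 _ hmem1
    have hx2 := hb2 _ hmem2
    rw [foldl_if_append, PySem.List.pyGetD_map_pyRange _ N k _ hkN]
    rw [foldl_if_append, PySem.List.pyGetD_map_pyRange _ N k _ hkN,
        PySem.List.pyGetD_map_pyRange _ N k _ hkN]
    rw [pvDecode_eq N arr1 k hkN hL1 hx1, pvDecode_eq N arr2 k hkN hL2 hx2]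
    have e1 : arr1[k]'(by omega) = (((arr1[k]'(by omega)).toNat : Nat) : Int) :=
      (Int.toNat_of_nonneg hx1.1).symm
    have e2 : arr2[k]'(by omega) = (((arr2[k]'(by omega)).toNat : Nat) : Int) :=
      (Int.toNat_of_nonneg hx2.1).symm
    have hm1 : (arr1[k]'(by omega)).toNat < 2 ^ N := by
      have := hx1.2
      have hp : ((2:Int))^N = ((2^N : Nat) : Int) := by push_cast; ring
      omega
    have hm2 : (arr2[k]'(by omega)).toNat < 2 ^ N := by
      have := hx2.2
      have hp : ((2:Int))^N = ((2^N : Nat) : Int) := by push_cast; ring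
      omega
    have hlor : (arr1[k]'(by omega)).lor (arr2[k]'(by omega))
        = ((((arr1[k]'(by omega)).toNat ||| (arr2[k]'(by omega)).toNat : Nat)) : Int) := by
      conv_lhs => rw [e1, e2]
      rfl
    rw [hlor, formatBin_eq N _ hN0 (Nat.or_lt_two_pow hm1 hm2)]
    congr 1
    unfold canonRow
    rw [PySem.List.pyRange_one 0 (N : Int)]
    simp only [Int.sub_zero, Int.toNat_natCast, List.map_map]
    apply List.map_congr_left
    intro t ht
    have htN : t < N := List.mem_range.mp ht
    simp only [Function.comp_apply, zero_add]
    rw [PySem.List.pyGetD_natCast, List.getD_eq_getElem _ _ (by simp; omega)]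
    simp only [List.getElem_map, List.getElem_range, Function.comp_apply]
    have hrev : ∀ (mm : Nat),
        PySem.List.pyGetD ((List.map (fun j => if mm.testBit j = true then (1:Int) else 0) (List.range N)).reverse) (↑t) 0
          = (if mm.testBit (N - 1 - t) then (1:Int) else 0) := by
      intro mm
      rw [PySem.List.pyGetD_natCast, List.getD_eq_getElem _ _ (by simp; omega),
          List.getElem_reverse]
      simp only [List.getElem_map, List.getElem_range, List.length_reverse,
    List.length_map, List.length_range]
    rw [hrev, hrev]
    by_cases b1 : (arr1[k]'(by omega)).toNat.testBit (N-1-t) <;>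
      by_cases b2 : (arr2[k]'(by omega)).toNat.testBit (N-1-t) <;>
        simp [Nat.testBit_or, b1, b2]
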